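-- pv_equiv track=rewrite | github.com/yushyn-andriy/algo | competitions/onlinejudge/ch2/linear/10050/p10050.py | get_loosed_days
-- ===== SOURCE A (Python) =====
-- def is_holiday(number):
--     if number == 6 or number == 7:
--         return True
--     return False
--
-- def get_loosed_days(d, params):
--     working_calendar = [True] * (d + 1)
--     for i in range(1, d + 1):
--         c_day = (i - 1) % 7 + 1
--         if is_holiday(c_day):
--             continue
--         for p in params:
--             if i % p == 0:
--                 working_calendar[i] = False
--
--     nwd = 0
--     for v in working_calendar:
--         if v is False:
--             nwd += 1
--     return nwd
-- ===== SOURCE B (Python) =====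
-- def get_loosed_days(d, params):
--     # Sieve: mark multiples of each |p| once, then count marked weekdays.
--     marked = [False] * (d + 1)
--     for p in params:
--         q = abs(p)
--         for m in range(q, d + 1, q):
--             marked[m] = True
--     return sum(1 for i in range(1, d + 1) if (i - 1) % 7 + 1 <= 5 and marked[i])
-- ===== Notes on version B (the rewrite author's own statement) =====
-- stated objective: faster
-- what changed: Replaces the per-day scan over all periods (O(d*k)) by a sieve that marks the multiples of each |p| once and then counts marked weekdays in one pass.
-- outside the precondition, e.g. on get_loosed_days(0, [0]): A returns 0, B raises ValueError
import Mathlib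
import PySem

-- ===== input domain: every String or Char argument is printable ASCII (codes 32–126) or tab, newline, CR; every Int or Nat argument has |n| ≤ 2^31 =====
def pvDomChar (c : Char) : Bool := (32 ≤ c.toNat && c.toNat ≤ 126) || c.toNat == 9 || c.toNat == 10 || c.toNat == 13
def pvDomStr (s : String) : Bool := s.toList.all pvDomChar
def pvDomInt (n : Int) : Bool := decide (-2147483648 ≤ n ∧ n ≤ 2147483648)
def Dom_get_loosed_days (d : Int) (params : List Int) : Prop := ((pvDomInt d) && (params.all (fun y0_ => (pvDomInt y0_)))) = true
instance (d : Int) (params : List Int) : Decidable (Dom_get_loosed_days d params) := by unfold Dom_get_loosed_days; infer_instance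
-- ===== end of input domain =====

-- B replaces A's per-day scan over all periods by a divisor sieve (mark the multiples of each |p| once, then count marked weekdays); return values agree on Pre_.


-- ===== PORT A =====
def is_holiday (number : Int) : Bool :=
  if number == 6 || number == 7 then true else false

-- literal port of A; working_calendar[i] = False uses .set i.toNat, exact because i ∈ range(1, d+1) is nonnegative and in range
def get_loosed_days (d : Int) (params : List Int) : Int :=
  let working_calendar : List Bool := PySem.List.pyRepeat [true] (d + 1)
  let working_calendar :=
    (PySem.List.pyRange 1 (d + 1) 1).foldl (fun wc i =>
      let c_day := PySem.Int.mod (i - 1) 7 + 1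
      if is_holiday c_day then wc
      else params.foldl (fun wc p =>
        if PySem.Int.mod i p == 0 then wc.set i.toNat false else wc) wc) working_calendar
  working_calendar.foldl (fun nwd v => if v == false then nwd + 1 else nwd) 0

-- ===== PORT B =====
-- port of B; marked[i] is read with getD, exact because i ∈ range(1, d+1) is nonnegative and in range
def get_loosed_days_alt (d : Int) (params : List Int) : Int :=
  let marked : List Bool := PySem.List.pyRepeat [false] (d + 1)
  let marked := params.foldl (fun m p =>
      (PySem.List.pyRange (p.natAbs : Int) (d + 1) (p.natAbs : Int)).foldl
        (fun m i => m.set i.toNat true) m) marked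
  (PySem.List.pyRange 1 (d + 1) 1).foldl
    (fun s i =>
      if decide (PySem.Int.mod (i - 1) 7 + 1 ≤ 5) && marked.getD i.toNat false then s + 1
      else s) 0

-- ===== PRECONDITION & SPEC =====
-- Pre_ excludes params containing 0: A raises ZeroDivisionError whenever d ≥ 1, and B's own range step raises ValueError for any d.
def Pre_get_loosed_days (d : Int) (params : List Int) : Prop := ∀ p ∈ params, p ≠ 0
instance (d : Int) (params : List Int) : Decidable (Pre_get_loosed_days d params) := by unfold Pre_get_loosed_days; infer_instance
def pvWitness_get_loosed_days : Int × List Int := (10, [3, 5])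

def Spec_get_loosed_days (d : Int) (params : List Int) (out : Int) : Prop := out = get_loosed_days_alt d params
instance (d : Int) (params : List Int) (out : Int) : Decidable (Spec_get_loosed_days d params out) := by unfold Spec_get_loosed_days; infer_instance

-- ===== CLAIM (what is proved, stated in full; the proofs are below) =====
def Claim_equal_get_loosed_days : Prop := ∀ (d : Int) (params : List Int), Dom_get_loosed_days d params → Pre_get_loosed_days d params → Spec_get_loosed_days d params (get_loosed_days d params)

-- ===== LEMMAS AND PROOFS =====

-- the day predicate both programs count: a non-weekend day divisible by some period
def dayHit (params : List Int) (i : Int) : Bool :=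
  !(is_holiday (PySem.Int.mod (i - 1) 7 + 1)) && params.any (fun p => PySem.Int.mod i p == 0)

-- the same predicate read off a 0-based calendar position
def hitN (params : List Int) (j : Nat) : Bool := decide (1 ≤ j) && dayHit params (j : Int)

lemma getD_set_false (m : List Bool) (k j : Nat) :
    (m.set k false).getD j false = (m.getD j false && !(k == j)) := by
  simp only [List.getD, List.getElem?_set]
  split_ifs with h1 h2 <;> simp [h1]

lemma getD_set_true (m : List Bool) (k j : Nat) :
    (m.set k true).getD j false = (m.getD j false || (k == j && decide (j < m.length))) := by
  by_cases h1 : k = j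
  · subst h1
    by_cases h2 : k < m.length
    · simp [List.getD, h2]
    · simp [List.getD, h2]
  · simp [List.getD, h1]

-- repeatedly setting the SAME index to false collapses to one conditional set
lemma innerA_eq (params : List Int) (i : Int) (m : List Bool) :
    params.foldl (fun wc p => if PySem.Int.mod i p == 0 then wc.set i.toNat false else wc) m
      = if params.any (fun p => PySem.Int.mod i p == 0) then m.set i.toNat false else m := by
  induction params generalizing m with
  | nil => simp
  | cons p ps ih =>
    simp only [List.foldl_cons, List.any_cons]
    by_cases h : PySem.Int.mod i p == 0
    · rw [if_pos h, ih]
      by_cases h2 : (ps.any fun p => PySem.Int.mod i p == 0) = true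
      · rw [if_pos h2, if_pos (by simp [h, h2]), List.set_set]
      · rw [if_neg h2, if_pos (by simp [h])]
    · rw [if_neg h, ih]
      simp [h]

lemma foldl_set_false_length (l : List Int) (p : Int → Bool) (f : Int → Nat) (m : List Bool) :
    (l.foldl (fun m i => if p i then m.set (f i) false else m) m).length = m.length := by
  induction l generalizing m with
  | nil => rfl
  | cons i l ih => simp only [List.foldl_cons]; rw [ih]; split <;> simp

lemma foldl_set_false_getD (l : List Int) (p : Int → Bool) (f : Int → Nat) (m : List Bool) (j : Nat) :
    (l.foldl (fun m i => if p i then m.set (f i) false else m) m).getD j false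
      = (m.getD j false && !(l.any (fun i => p i && (f i == j)))) := by
  induction l generalizing m with
  | nil => simp
  | cons i l ih =>
    simp only [List.foldl_cons, List.any_cons, ih]
    by_cases h : p i
    · rw [if_pos h, getD_set_false]
      cases hm : m.getD j false <;> simp [h, Bool.and_assoc]
    · simp [h]

lemma foldl_set_true_length (l : List Int) (m : List Bool) :
    (l.foldl (fun m i => m.set i.toNat true) m).length = m.length := by
  induction l generalizing m with
  | nil => rfl
  | cons i l ih => simp [List.foldl_cons, ih]

lemma foldl_set_true_getD (l : List Int) (m : List Bool) (j : Nat) :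
    (l.foldl (fun m i => m.set i.toNat true) m).getD j false
      = (m.getD j false || l.any (fun i => i.toNat == j && decide (j < m.length))) := by
  induction l generalizing m with
  | nil => simp
  | cons i l ih =>
    simp only [List.foldl_cons, List.any_cons, ih, getD_set_true, List.length_set]
    cases m.getD j false <;> simp [Bool.or_assoc]

lemma not_holiday_iff (i : Int) :
    (!(is_holiday (PySem.Int.mod (i - 1) 7 + 1))) = decide (PySem.Int.mod (i - 1) 7 + 1 ≤ 5) := by
  have h0 := PySem.Int.mod_nonneg (i - 1) (by norm_num : (0:Int) < 7)
  have h1 := PySem.Int.mod_lt (i - 1) (by norm_num : (0:Int) < 7)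
  set c := PySem.Int.mod (i - 1) 7 with hc
  simp only [is_holiday]
  by_cases h5 : c + 1 ≤ 5
  · rw [if_neg (by simp; omega), decide_eq_true h5]; rfl
  · rw [if_pos (by simp; omega), decide_eq_false h5]; rfl

-- A computes the number of calendar positions satisfying hitN
lemma A_eq (d : Int) (params : List Int) :
    get_loosed_days d params
      = ((List.range (d + 1).toNat).countP (hitN params) : Int) := by
  simp only [get_loosed_days]
  have hstep : (fun (wc : List Bool) (i : Int) =>
      if is_holiday (PySem.Int.mod (i - 1) 7 + 1) then wc
      else params.foldl (fun wc p =>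
        if PySem.Int.mod i p == 0 then wc.set i.toNat false else wc) wc)
      = fun (wc : List Bool) (i : Int) =>
        if dayHit params i then wc.set i.toNat false else wc := by
    funext wc i
    rw [innerA_eq]
    unfold dayHit
    cases hh : is_holiday (PySem.Int.mod (i - 1) 7 + 1) <;> simp
  rw [hstep, PySem.List.foldl_beq_add_one]
  have hwc : (PySem.List.pyRange 1 (d + 1) 1).foldl
        (fun wc i => if dayHit params i then wc.set i.toNat false else wc)
        (PySem.List.pyRepeat [true] (d + 1))
      = (List.range (d + 1).toNat).map (fun j => !(hitN params j)) := by
    apply List.ext_getElem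
    · rw [foldl_set_false_length]
      simp [PySem.List.pyRepeat_singleton]
    · intro j hj1 hj2
      have hjlen : j < (d + 1).toNat := by
        rwa [foldl_set_false_length, PySem.List.pyRepeat_singleton, List.length_replicate] at hj1
      rw [← List.getD_eq_getElem _ false hj1, foldl_set_false_getD]
      rw [PySem.List.pyRepeat_singleton]
      rw [List.getElem_map, List.getElem_range]
      rw [List.getD_replicate _ hjlen, Bool.true_and]
      unfold hitN
      congr 1
      rw [Bool.eq_iff_iff]
      simp only [List.any_eq_true, PySem.List.mem_pyRange_one, Bool.and_eq_true, beq_iff_eq,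
        decide_eq_true_eq]
      constructor
      · rintro ⟨i, ⟨hi1, hi2⟩, hd, hij⟩
        have hieq : i = (j : Int) := by omega
        subst hieq
        exact ⟨by omega, hd⟩
      · rintro ⟨hj, hd⟩
        exact ⟨(j : Int), ⟨by omega, by omega⟩, hd, by simp⟩
  rw [hwc]
  rw [List.count_eq_countP, List.countP_map]
  have : ((fun x => x == false) ∘ fun j => !(hitN params j)) = hitN params := by
    funext j
    simp only [Function.comp_apply]
    cases hitN params j <;> rfl
  rw [this, zero_add]

lemma marked_fold_getD (d : Int) (l : List Int) (m : List Bool) (j : Nat) :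
    (l.foldl (fun m p =>
        (PySem.List.pyRange (p.natAbs : Int) (d + 1) (p.natAbs : Int)).foldl
          (fun m i => m.set i.toNat true) m) m).getD j false
      = (m.getD j false || l.any (fun p =>
          (PySem.List.pyRange (p.natAbs : Int) (d + 1) (p.natAbs : Int)).any
            (fun i => i.toNat == j && decide (j < m.length)))) := by
  induction l generalizing m with
  | nil => simp
  | cons p l ih =>
    simp only [List.foldl_cons, List.any_cons, ih, foldl_set_true_getD, foldl_set_true_length]
    cases m.getD j false <;> simp

-- B computes the number of days in range(1, d+1) satisfying dayHit
lemma B_eq (d : Int) (params : List Int) (hp : ∀ p ∈ params, p ≠ 0) :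
    get_loosed_days_alt d params
      = ((PySem.List.pyRange 1 (d + 1) 1).countP (dayHit params) : Int) := by
  simp only [get_loosed_days_alt]
  rw [PySem.List.foldl_if_add_one, zero_add]
  congr 1
  apply List.countP_congr
  intro i hi
  rw [PySem.List.mem_pyRange_one] at hi
  have hm : (params.foldl (fun m p =>
        (PySem.List.pyRange (p.natAbs : Int) (d + 1) (p.natAbs : Int)).foldl
          (fun m i => m.set i.toNat true) m) (PySem.List.pyRepeat [false] (d + 1))).getD i.toNat false
      = params.any (fun p => PySem.Int.mod i p == 0) := by
    rw [marked_fold_getD, PySem.List.pyRepeat_singleton]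
    have hrep : (List.replicate (d + 1).toNat false).getD i.toNat false = false := by
      simp [List.getD, List.getElem?_replicate]
      split <;> rfl
    rw [hrep, List.length_replicate, Bool.false_or]
    apply PySem.List.any_congr_mem
    intro p hpmem
    have hq : (0:Int) < (p.natAbs : Int) := by
      exact_mod_cast Int.natAbs_pos.mpr (hp p hpmem)
    rw [Bool.eq_iff_iff]
    simp only [List.any_eq_true, PySem.List.mem_pyRange_iff_of_pos hq, Bool.and_eq_true,
      beq_iff_eq, decide_eq_true_eq, PySem.Int.mod_eq_zero_iff_dvd]
    constructor
    · rintro ⟨x, ⟨hx1, hx2, hx3⟩, hxj, _⟩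
      have hxi : x = i := by omega
      subst hxi
      have hdvd : (p.natAbs : Int) ∣ x := by
        have := dvd_add hx3 (dvd_refl (p.natAbs : Int))
        simpa using this
      exact Int.natAbs_dvd.mp hdvd
    · intro hdvd
      have hqd : (p.natAbs : Int) ∣ i := Int.natAbs_dvd.mpr hdvd
      refine ⟨i, ⟨Int.le_of_dvd (by omega) hqd, by omega, dvd_sub hqd dvd_rfl⟩, rfl, by omega⟩
  rw [hm, ← not_holiday_iff]
  unfold dayHit
  exact Iff.rfl

-- the two countings are the same up to the 1-based/0-based index shift
lemma countP_shift (d : Int) (params : List Int) :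
    (List.range (d + 1).toNat).countP (hitN params)
      = (PySem.List.pyRange 1 (d + 1) 1).countP (dayHit params) := by
  by_cases hd : 0 ≤ d
  · have h1 : (d + 1).toNat = d.toNat + 1 := by omega
    rw [h1, List.range_succ_eq_map, List.countP_cons_of_neg (by simp [hitN]),
        List.countP_map, PySem.List.pyRange_one, List.countP_map]
    have h2 : (d + 1 - 1).toNat = d.toNat := by omega
    rw [h2]
    apply List.countP_congr
    intro k hk
    have hcast : ((Nat.succ k : Nat) : Int) = 1 + (k : Int) := by push_cast; ring
    simp [hitN, Function.comp_apply, hcast]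
  · have h1 : (d + 1).toNat = 0 := by omega
    rw [h1, PySem.List.pyRange_one_eq_nil (by omega)]
    rfl

-- ===== VERDICT (by name: the statement is the Claim_ definition above) =====
theorem get_loosed_days_spec : Claim_equal_get_loosed_days := by
  intro d params _ hp
  unfold Spec_get_loosed_days
  rw [A_eq, B_eq d params hp, countP_shift]
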